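-- pv_equiv track=rewrite | github.com/gercivaldojr-stack/Gercivaldo- | converter_v5/streamlit_app/app.py | count_headings
-- ===== SOURCE A (Python) =====
-- def count_headings(text: str) -> dict:
--     """Conta headings por nível."""
--     counts = {}
--     for line in text.split("\n"):
--         if line.startswith("#"):
--             level = len(line) - len(line.lstrip("#"))
--             if level <= 6:
--                 key = f"H{level}"
--                 counts[key] = counts.get(key, 0) + 1
--     return counts
-- ===== SOURCE B (Python) =====
-- def count_headings(text: str) -> dict:
--     """Single character-level pass (no line splitting): a tiny state machine counts
--     the '#'-prefix of each line and records the heading key at the point where the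
--     prefix ends; the dict is then built by counting each first-seen key."""
--     keys = []
--     level = 0  # '#'-count at the current line start; -1 once past the prefix
--     for ch in text + "\n":
--         if ch == "\n":
--             if 1 <= level <= 6:
--                 keys.append("H%d" % level)
--             level = 0
--         elif ch == "#" and level >= 0:
--             level += 1
--         else:
--             if 1 <= level <= 6:
--                 keys.append("H%d" % level)
--             level = -1
--     return {k: keys.count(k) for k in dict.fromkeys(keys)}
-- ===== Notes on version B (the rewrite author's own statement) =====
-- stated objective: alternative
-- what changed: Replaces A's split-into-lines loop that increments a dict per heading with a single character-level state machine (no line splitting) that collects the heading keys in order, and then builds the dict by dedup-and-count over that key list.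
import Mathlib
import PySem

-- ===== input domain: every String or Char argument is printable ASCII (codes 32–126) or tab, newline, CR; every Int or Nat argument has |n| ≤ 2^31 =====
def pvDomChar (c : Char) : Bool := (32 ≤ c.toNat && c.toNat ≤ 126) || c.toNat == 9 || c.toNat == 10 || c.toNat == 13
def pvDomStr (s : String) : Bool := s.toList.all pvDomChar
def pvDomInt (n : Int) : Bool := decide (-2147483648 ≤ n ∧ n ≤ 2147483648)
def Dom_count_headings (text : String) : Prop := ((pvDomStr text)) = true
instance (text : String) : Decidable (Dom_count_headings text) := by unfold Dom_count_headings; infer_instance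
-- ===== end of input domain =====

-- B replaces A's split-into-lines loop with a dict by a single character-level state
-- machine collecting the heading keys, plus a dedup-and-count dict comprehension
-- (alternative decomposition, similar cost).

-- ===== PORT A =====
def count_headings (text : String) : List (String × Int) :=
  ((PySem.Chars.splitOn text.toList ['\n']).foldl (fun counts line =>
    if PySem.Chars.startswith line ['#'] then
      -- line.lstrip("#") ported as dropWhile (· == '#'): exact (strips leading '#' chars)
      let level : Int := (line.length : Int) - ((line.dropWhile (· == '#')).length : Int)
      if level ≤ 6 then
        let key := "H" ++ PySem.Int.toStr level
        counts.insert key (counts.getD key 0 + 1)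
      else counts
    else counts) PySem.Dict.empty).items

-- ===== PORT B =====
def bEmit (level : Int) (keys : List String) : List String :=
  if 1 ≤ level ∧ level ≤ 6 then keys ++ ["H" ++ PySem.Int.toStr level] else keys

def bLoop : List Char → Int → List String → List String
  | [], _, keys => keys
  | c :: cs, level, keys =>
    if c = '\n' then bLoop cs 0 (bEmit level keys)
    else if c = '#' ∧ 0 ≤ level then bLoop cs (level + 1) keys
    else bLoop cs (-1) (bEmit level keys)

def count_headings_alt (text : String) : List (String × Int) :=
  let keys := bLoop (text.toList ++ ['\n']) 0 []
  (PySem.List.dedup keys).map (fun k => (k, (keys.count k : Int)))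

-- ===== PRECONDITION & SPEC =====
def Spec_count_headings (text : String) (out : List (String × Int)) : Prop := out = count_headings_alt text
instance (text : String) (out : List (String × Int)) : Decidable (Spec_count_headings text out) := by unfold Spec_count_headings; infer_instance

-- ===== CLAIM (what is proved, stated in full; the proofs are below) =====
def Claim_equal_count_headings : Prop := ∀ (text : String), Dom_count_headings text → Spec_count_headings text (count_headings text)

-- ===== LEMMAS AND PROOFS =====

-- proof-only: split at '\n' returned as (first line, remaining lines)
def splitNL : List Char → List Char × List (List Char)
  | [] => ([], [])
  | c :: r =>
    let (h, t) := splitNL r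
    if c = '\n' then ([], h :: t) else (c :: h, t)

lemma splitOn_go_spec (l : List Char) : ∀ (fuel : Nat), l.length < fuel → ∀ (cur : List Char) (acc : List (List Char)),
    PySem.Chars.splitOn.go ['\n'] fuel l cur acc
      = acc.reverse ++ (cur.reverse ++ (splitNL l).1) :: (splitNL l).2 := by
  induction l with
  | nil =>
    intro fuel h cur acc
    match fuel with
    | fuel + 1 => simp [PySem.Chars.splitOn.go, splitNL]
  | cons c r ih =>
    intro fuel h cur acc
    match fuel with
    | fuel + 1 =>
      by_cases hc : c = '\n'
      · subst hc
        rw [show PySem.Chars.splitOn.go ['\n'] (fuel+1) ('\n' :: r) cur acc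
              = PySem.Chars.splitOn.go ['\n'] fuel r [] (cur.reverse :: acc) by
            simp [PySem.Chars.splitOn.go, List.isPrefixOf]]
        rw [ih fuel (by simpa using h) [] (cur.reverse :: acc)]
        simp [splitNL]
      · rw [show PySem.Chars.splitOn.go ['\n'] (fuel+1) (c :: r) cur acc
              = PySem.Chars.splitOn.go ['\n'] fuel r (c :: cur) acc by
            simp [PySem.Chars.splitOn.go, List.isPrefixOf, Ne.symm hc]]
        rw [ih fuel (by simpa using h) (c :: cur) acc]
        simp [splitNL, hc]

lemma chars_splitOn_eq (l : List Char) :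
    PySem.Chars.splitOn l ['\n'] = (splitNL l).1 :: (splitNL l).2 := by
  rw [PySem.Chars.splitOn, splitOn_go_spec l (l.length + 1) (by omega) [] []]
  simp

-- the key (0 or 1 of them) A records for one line
def keyOf (line : List Char) : List String :=
  if PySem.Chars.startswith line ['#'] then
    if ((line.length : Int) - ((line.dropWhile (· == '#')).length : Int)) ≤ 6 then
      ["H" ++ PySem.Int.toStr ((line.length : Int) - ((line.dropWhile (· == '#')).length : Int))]
    else []
  else []

lemma foldl_eq_counter_fold (lines : List (List Char)) :
    ∀ (d : PySem.Dict String Int),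
    lines.foldl (fun counts line =>
      if PySem.Chars.startswith line ['#'] then
        let level : Int := (line.length : Int) - ((line.dropWhile (· == '#')).length : Int)
        if level ≤ 6 then
          let key := "H" ++ PySem.Int.toStr level
          counts.insert key (counts.getD key 0 + 1)
        else counts
      else counts) d
    = (lines.flatMap keyOf).foldl (fun d k => d.insert k (d.getD k 0 + 1)) d := by
  induction lines with
  | nil => intro d; rfl
  | cons line rest ih =>
    intro d
    rw [List.flatMap_cons, List.foldl_append, List.foldl_cons, ih]
    congr 1
    unfold keyOf
    by_cases h1 : PySem.Chars.startswith line ['#']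
    · by_cases h2 : ((line.length : Int) - ((line.dropWhile (· == '#')).length : Int)) ≤ 6 <;>
        simp [h1, h2]
    · simp [h1]

lemma keyOf_replicate (n : Nat) :
    keyOf (List.replicate n '#') = bEmit (n : Int) [] := by
  unfold keyOf bEmit
  match n with
  | 0 => simp [PySem.Chars.startswith, List.isPrefixOf]
  | n + 1 =>
    have hsw : PySem.Chars.startswith (List.replicate (n+1) '#') ['#'] = true := by
      simp [PySem.Chars.startswith, List.replicate_succ]
    have hdw : (List.replicate (n+1) '#').dropWhile (· == '#') = [] := by
      simp
    rw [hsw, hdw]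
    simp only [List.length_replicate, List.length_nil, Nat.cast_zero, sub_zero,
      Nat.cast_add, Nat.cast_one]
    by_cases h : ((n : Int) + 1) ≤ 6
    · rw [if_pos h,
        if_pos (show (1:Int) ≤ (n:Int)+1 ∧ (n:Int)+1 ≤ 6 from ⟨by omega, h⟩)]
      simp
    · rw [if_neg h,
        if_neg (show ¬((1:Int) ≤ (n:Int)+1 ∧ (n:Int)+1 ≤ 6) from fun h2 => h h2.2)]
      simp

lemma keyOf_prefix (n : Nat) (c : Char) (h : List Char) (hc : c ≠ '#') :
    keyOf (List.replicate n '#' ++ c :: h) = bEmit (n : Int) [] := by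
  rw [← keyOf_replicate]
  unfold keyOf
  have hdw : (List.replicate n '#' ++ c :: h).dropWhile (· == '#') = c :: h := by
    rw [List.dropWhile_append]
    simp [hc]
  have hdw' : (List.replicate n '#').dropWhile (· == '#') = [] := by
    simp
  have hlen : ((List.replicate n '#' ++ c :: h).length : Int)
      - (((List.replicate n '#' ++ c :: h).dropWhile (· == '#')).length : Int)
      = ((List.replicate n '#').length : Int)
      - (((List.replicate n '#').dropWhile (· == '#')).length : Int) := by
    rw [hdw, hdw']
    simp only [List.length_append, List.length_replicate, List.length_cons, List.length_nil]
    push_cast; omega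
  have hsw : PySem.Chars.startswith (List.replicate n '#' ++ c :: h) ['#']
      = PySem.Chars.startswith (List.replicate n '#') ['#'] := by
    match n with
    | 0 => simp [PySem.Chars.startswith, List.isPrefixOf, Ne.symm hc]
    | m + 1 => simp [PySem.Chars.startswith, List.replicate_succ, List.isPrefixOf]
  rw [hsw, hlen]

lemma bEmit_append (level : Int) (keys : List String) :
    bEmit level keys = keys ++ bEmit level [] := by
  unfold bEmit; split <;> simp

-- the state machine, run to the end of the (newline-terminated) input,
-- produces exactly the per-line keys of the remaining text
lemma bLoop_spec (cs : List Char) :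
    (∀ (n : Nat) (keys : List String),
      bLoop (cs ++ ['\n']) (n : Int) keys
        = keys ++ keyOf (List.replicate n '#' ++ (splitNL cs).1) ++ ((splitNL cs).2).flatMap keyOf)
    ∧ (∀ (keys : List String),
      bLoop (cs ++ ['\n']) (-1) keys = keys ++ ((splitNL cs).2).flatMap keyOf) := by
  induction cs with
  | nil =>
    constructor
    · intro n keys
      simp only [List.nil_append, bLoop, splitNL, List.append_nil, List.flatMap_nil]
      rw [keyOf_replicate, bEmit_append]
      simp
    · intro keys
      simp [bLoop, bEmit, splitNL]
  | cons c r ih =>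
    obtain ⟨ihP, ihQ⟩ := ih
    constructor
    · intro n keys
      by_cases hc : c = '\n'
      · subst hc
        rw [show (('\n' :: r) ++ ['\n'] : List Char) = '\n' :: (r ++ ['\n']) by simp,
          show bLoop ('\n' :: (r ++ ['\n'])) (n : Int) keys
            = bLoop (r ++ ['\n']) 0 (bEmit (n : Int) keys) by simp [bLoop]]
        rw [show (0 : Int) = ((0 : Nat) : Int) by norm_num, ihP 0 (bEmit (n : Int) keys)]
        rw [bEmit_append, ← keyOf_replicate]
        simp [splitNL]
      · by_cases hh : c = '#'
        · subst hh
          rw [show (('#' :: r) ++ ['\n'] : List Char) = '#' :: (r ++ ['\n']) by simp,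
            show bLoop ('#' :: (r ++ ['\n'])) (n : Int) keys
              = bLoop (r ++ ['\n']) ((n : Int) + 1) keys by
              simp [bLoop]]
          rw [show ((n : Int) + 1) = ((n + 1 : Nat) : Int) by push_cast; ring, ihP (n + 1) keys]
          simp only [splitNL]
          rw [if_neg (by decide)]
          congr 2
          rw [show ('#' :: (splitNL r).1 : List Char)
              = List.replicate 1 '#' ++ (splitNL r).1 by simp [List.replicate]]
          rw [← List.append_assoc, ← List.replicate_add]
        · rw [show ((c :: r) ++ ['\n'] : List Char) = c :: (r ++ ['\n']) by simp,
            show bLoop (c :: (r ++ ['\n'])) (n : Int) keys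
              = bLoop (r ++ ['\n']) (-1) (bEmit (n : Int) keys) by
              simp [bLoop, hc, hh]]
          rw [ihQ (bEmit (n : Int) keys), bEmit_append]
          simp only [splitNL]
          rw [if_neg hc]
          rw [keyOf_prefix n c (splitNL r).1 hh]
    · intro keys
      by_cases hc : c = '\n'
      · subst hc
        rw [show (('\n' :: r) ++ ['\n'] : List Char) = '\n' :: (r ++ ['\n']) by simp,
          show bLoop ('\n' :: (r ++ ['\n'])) (-1) keys
            = bLoop (r ++ ['\n']) 0 (bEmit (-1) keys) by simp [bLoop]]
        rw [show (0 : Int) = ((0 : Nat) : Int) by norm_num, ihP 0 (bEmit (-1) keys)]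
        simp [splitNL, bEmit]
      · rw [show ((c :: r) ++ ['\n'] : List Char) = c :: (r ++ ['\n']) by simp,
          show bLoop (c :: (r ++ ['\n'])) (-1) keys
            = bLoop (r ++ ['\n']) (-1) (bEmit (-1) keys) by
            simp [bLoop, hc]]
        rw [ihQ (bEmit (-1) keys)]
        simp [splitNL, hc, bEmit]

-- both programs collect the same key sequence
lemma keys_eq (cs : List Char) :
    bLoop (cs ++ ['\n']) 0 [] = (PySem.Chars.splitOn cs ['\n']).flatMap keyOf := by
  rw [chars_splitOn_eq, List.flatMap_cons,
    show (0 : Int) = ((0 : Nat) : Int) by norm_num, (bLoop_spec cs).1 0 []]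
  simp

-- ===== VERDICT (by name: the statement is the Claim_ definition above) =====
theorem count_headings_spec : Claim_equal_count_headings := by
  intro text _
  unfold Spec_count_headings count_headings count_headings_alt
  rw [foldl_eq_counter_fold, PySem.Dict.foldl_insert_getD_add_one_eq_counter,
    PySem.Dict.items_counter, keys_eq]
  simp [PySem.List.dedup_eq_ofList]
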